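-- pv_equiv track=rewrite | github.com/jhkim-spa/FVNet | mmdet3d/models/dense_heads/pvgnet_head2.py | images_to_levels
-- ===== SOURCE A (Python) =====
-- def images_to_levels(target, num_levels):
--     batch_size = len(num_levels)
--     num_featmap_size = len(num_levels[0])
--     batch_targets = []
--     for i in range(batch_size):
--         start = 0
--         level_targets = []
--         for j in range(num_featmap_size):
--             res_target = target[i]
--             end = start + num_levels[i][j]
--             level_targets.append(res_target[start: end])
--             start = end
--         batch_targets.append(level_targets)
--
--     level_targets = []
--     for i in range(num_featmap_size):
--         res_targets = []
--         for j in range(batch_size):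
--             res_targets.append(batch_targets[j][i])
--         level_targets.append(res_targets)
--
--     return level_targets
-- ===== SOURCE B (Python) =====
-- def images_to_levels(target, num_levels):
--     num_featmap_size = len(num_levels[0])
--     return [[target[i][sum(num_levels[i][:j]):sum(num_levels[i][:j]) + num_levels[i][j]]
--              for i in range(len(num_levels))]
--             for j in range(num_featmap_size)]
-- ===== Notes on version B (the rewrite author's own statement) =====
-- stated objective: simpler
-- what changed: B replaces A's two staged passes (a stateful batch-major slicing loop building an intermediate nested list, then a transpose loop) with a single stateless level-major comprehension that computes each slice's start directly as the closed-form prefix sum sum(num_levels[i][:j]).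
import Mathlib
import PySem

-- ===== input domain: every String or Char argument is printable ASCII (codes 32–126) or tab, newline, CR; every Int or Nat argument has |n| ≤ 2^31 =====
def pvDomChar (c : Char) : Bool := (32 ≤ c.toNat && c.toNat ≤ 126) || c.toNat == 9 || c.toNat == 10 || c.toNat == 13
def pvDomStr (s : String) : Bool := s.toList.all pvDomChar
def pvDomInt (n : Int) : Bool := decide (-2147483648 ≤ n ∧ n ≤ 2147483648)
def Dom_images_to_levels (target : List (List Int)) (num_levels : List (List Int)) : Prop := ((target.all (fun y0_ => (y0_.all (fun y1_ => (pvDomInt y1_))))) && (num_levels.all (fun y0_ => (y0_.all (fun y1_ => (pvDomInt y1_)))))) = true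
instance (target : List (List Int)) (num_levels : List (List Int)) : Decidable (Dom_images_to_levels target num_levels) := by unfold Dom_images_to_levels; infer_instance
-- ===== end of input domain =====

-- B replaces A's two staged passes (a stateful batch-major slicing loop building an
-- intermediate nested list, then a transpose loop) with a single stateless level-major
-- comprehension whose slice start is the closed-form prefix sum sum(num_levels[i][:j])
-- (objective: simpler).
-- Pre_ excludes exactly the inputs where Python A raises IndexError (empty num_levels,
-- a num_levels row shorter than the first one, or target shorter than num_levels).

-- ===== PORT A =====
def images_to_levels (target : List (List Int)) (num_levels : List (List Int)) : List (List (List Int)) :=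
  let batch_size := num_levels.length
  let num_featmap_size := (num_levels.headD []).length
  let batch_targets : List (List (List Int)) :=
    (List.range batch_size).foldl (fun bt i =>
      let p := (List.range num_featmap_size).foldl
        (fun (st : Int × List (List Int)) j =>
          let res_target := target.getD i []
          let endv := st.1 + ((num_levels.getD i []).getD j 0)
          (endv, st.2 ++ [PySem.List.slice res_target (some st.1) (some endv)]))
        (0, [])
      bt ++ [p.2]) []
  (List.range num_featmap_size).foldl (fun lt i =>
    let res := (List.range batch_size).foldl (fun r j =>
      r ++ [(batch_targets.getD j []).getD i []]) []
    lt ++ [res]) []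

-- ===== PORT B =====
def images_to_levels_alt (target : List (List Int)) (num_levels : List (List Int)) : List (List (List Int)) :=
  let num_featmap_size := (num_levels.headD []).length
  (List.range num_featmap_size).map (fun j =>
    (List.range num_levels.length).map (fun i =>
      let row := num_levels.getD i []
      let s : Int := (PySem.List.slice row none (some (Int.ofNat j))).sum
      PySem.List.slice (target.getD i []) (some s) (some (s + row.getD j 0))))

-- ===== PRECONDITION & SPEC =====
-- Exactly where Python A returns: num_levels nonempty, and (unless the first row is
-- empty, in which case the inner loops never index) target covers every batch index
-- and every num_levels row is at least as long as the first.
def Pre_images_to_levels (target : List (List Int)) (num_levels : List (List Int)) : Prop :=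
  num_levels ≠ [] ∧
    ((num_levels.headD []).length = 0 ∨
      (num_levels.length ≤ target.length ∧
        ∀ row ∈ num_levels, (num_levels.headD []).length ≤ row.length))
instance (target : List (List Int)) (num_levels : List (List Int)) : Decidable (Pre_images_to_levels target num_levels) := by unfold Pre_images_to_levels; infer_instance

def pvWitness_images_to_levels : List (List Int) × List (List Int) :=
  ([[1, 2, 3], [4, 5, 6]], [[1, 2], [2, 1]])

def Spec_images_to_levels (target : List (List Int)) (num_levels : List (List Int)) (out : List (List (List Int))) : Prop := out = images_to_levels_alt target num_levels
instance (target : List (List Int)) (num_levels : List (List Int)) (out : List (List (List Int))) : Decidable (Spec_images_to_levels target num_levels out) := by unfold Spec_images_to_levels; infer_instance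

-- ===== CLAIM (what is proved, stated in full; the proofs are below) =====
def Claim_equal_images_to_levels : Prop := ∀ (target : List (List Int)) (num_levels : List (List Int)), Dom_images_to_levels target num_levels → Pre_images_to_levels target num_levels → Spec_images_to_levels target num_levels (images_to_levels target num_levels)

-- ===== LEMMAS AND PROOFS =====

-- prefix sums of a row (reading row[k] with default 0, as both ports do)
def pvPfx (row : List Int) : Nat → Int
  | 0 => 0
  | Nat.succ j => pvPfx row j + row.getD j 0

-- generic: 'acc ++ [f x]' folds are maps
theorem pvFoldlAppendMap {α β : Type} (f : α → β) (l : List α) (init : List β) :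
    l.foldl (fun acc x => acc ++ [f x]) init = init ++ l.map f := by
  induction l generalizing init with
  | nil => simp
  | cons x xs ih => simp [List.foldl, ih]

-- A's inner stateful loop: state after range n is (pvPfx n, the n slices)
theorem pvInnerA (tgt row : List Int) (n : Nat) :
    (List.range n).foldl
      (fun (st : Int × List (List Int)) j =>
        (st.1 + row.getD j 0,
          st.2 ++ [PySem.List.slice tgt (some st.1) (some (st.1 + row.getD j 0))]))
      (0, []) =
    (pvPfx row n,
      (List.range n).map (fun j =>
        PySem.List.slice tgt (some (pvPfx row j)) (some (pvPfx row (j + 1))))) := by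
  induction n with
  | zero => simp [pvPfx]
  | succ n ih =>
      rw [List.range_succ, List.foldl_append, ih]
      simp [pvPfx]

-- the sum of a take-prefix grows by the getD-read element
theorem pvSumTakeSucc (l : List Int) (j : Nat) :
    (l.take (j + 1)).sum = (l.take j).sum + l.getD j 0 := by
  induction l generalizing j with
  | nil => simp
  | cons x xs ih =>
      cases j with
      | zero => simp
      | succ j => simp [List.take, ih j]; ring

-- B's closed-form start equals A's running start
theorem pvSumTakeEqPfx (l : List Int) (j : Nat) :
    (l.take j).sum = pvPfx l j := by
  induction j with
  | zero => simp [pvPfx]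
  | succ j ih => rw [pvSumTakeSucc, ih]; rfl

theorem pvGetDMapRange {α : Type} (f : Nat → α) (n k : Nat) (d : α) (h : k < n) :
    (((List.range n).map f).getD k d) = f k := by
  rw [List.getD_eq_getElem?_getD]
  simp [h]

theorem images_to_levels_eq (target : List (List Int)) (num_levels : List (List Int)) :
    images_to_levels target num_levels = images_to_levels_alt target num_levels := by
  simp only [images_to_levels, images_to_levels_alt, pvInnerA, pvFoldlAppendMap,
    List.nil_append]
  apply List.map_congr_left
  intro j hj
  rw [List.mem_range] at hj
  apply List.map_congr_left
  intro i hi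
  rw [List.mem_range] at hi
  rw [pvGetDMapRange _ num_levels.length i _ hi,
    pvGetDMapRange _ (num_levels.headD []).length j _ hj,
    show (Int.ofNat j) = ((j : Nat) : Int) from rfl,
    PySem.List.slice_to_natCast, pvSumTakeEqPfx]
  simp [pvPfx]

-- ===== VERDICT (by name: the statement is the Claim_ definition above) =====
theorem images_to_levels_spec : Claim_equal_images_to_levels := by
  intro target num_levels _ _
  unfold Spec_images_to_levels
  exact images_to_levels_eq target num_levels
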